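-- pv_equiv track=rewrite | github.com/johanrex/adventofcode | 2022/15/15.py | get_coords_within_distance
-- ===== SOURCE A (Python) =====
-- def get_distance(a: tuple[int, int], b: tuple[int, int]):
--     return abs(a[0] - b[0]) + abs(a[1] - b[1])
--
-- def get_coords_within_distance(coord: tuple[int, int], distance):
--     x, y = coord
--     coords = set()
--
--     for y_i in range(y - distance, (y + distance) + 1):
--         for x_i in range(x - distance, (x + distance) + 1):
--             coord_candidate = (x_i, y_i)
--             if get_distance(coord, coord_candidate) > distance:
--                 continue
--             else:
--                 coords.add(coord_candidate)
--
--     return coords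
-- ===== SOURCE B (Python) =====
-- def get_coords_within_distance(coord, distance):
--     x, y = coord
--     coords = set()
--     for dy in range(-distance, distance + 1):
--         w = distance - abs(dy)
--         for dx in range(-w, w + 1):
--             coords.add((x + dx, y + dy))
--     return coords
-- ===== Notes on version B (the rewrite author's own statement) =====
-- stated objective: simpler
-- what changed: B enumerates the diamond directly (row half-width w = distance - |dy| bounds the inner loop) instead of scanning the full (2d+1)x(2d+1) square and filtering each cell with a Manhattan-distance guard.
import Mathlib
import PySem

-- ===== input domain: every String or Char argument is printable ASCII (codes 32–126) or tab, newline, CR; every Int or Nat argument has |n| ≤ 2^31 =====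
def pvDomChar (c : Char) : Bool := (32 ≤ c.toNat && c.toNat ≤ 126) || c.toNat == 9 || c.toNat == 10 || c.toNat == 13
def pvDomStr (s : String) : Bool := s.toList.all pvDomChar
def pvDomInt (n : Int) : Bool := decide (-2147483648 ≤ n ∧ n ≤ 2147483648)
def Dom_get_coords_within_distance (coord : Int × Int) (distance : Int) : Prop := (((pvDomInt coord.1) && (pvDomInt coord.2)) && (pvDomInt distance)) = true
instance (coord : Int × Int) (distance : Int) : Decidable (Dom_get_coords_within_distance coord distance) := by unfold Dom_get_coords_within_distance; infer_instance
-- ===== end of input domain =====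

-- B enumerates the diamond directly (row half-width w = distance - |dy|) instead of
-- scanning the full square and filtering each cell with a Manhattan-distance test.

-- ===== PORT A =====
def get_distance (a : Int × Int) (b : Int × Int) : Int :=
  |a.1 - b.1| + |a.2 - b.2|

def get_coords_within_distance (coord : Int × Int) (distance : Int) : List (Int × Int) :=
  let x := coord.1
  let y := coord.2
  (PySem.List.pyRange (y - distance) (y + distance + 1) 1).foldl (fun coords y_i =>
    (PySem.List.pyRange (x - distance) (x + distance + 1) 1).foldl (fun coords x_i =>
      if get_distance coord (x_i, y_i) > distance then coords
      else PySem.Set.add coords (x_i, y_i)) coords) PySem.Set.empty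

-- ===== PORT B =====
def get_coords_within_distance_alt (coord : Int × Int) (distance : Int) : List (Int × Int) :=
  let x := coord.1
  let y := coord.2
  (PySem.List.pyRange (-distance) (distance + 1) 1).foldl (fun coords dy =>
    let w := distance - |dy|
    (PySem.List.pyRange (-w) (w + 1) 1).foldl (fun coords dx =>
      PySem.Set.add coords (x + dx, y + dy)) coords) PySem.Set.empty

-- ===== PRECONDITION & SPEC =====
def Spec_get_coords_within_distance (coord : Int × Int) (distance : Int) (out : List (Int × Int)) : Prop := out = get_coords_within_distance_alt coord distance
instance (coord : Int × Int) (distance : Int) (out : List (Int × Int)) : Decidable (Spec_get_coords_within_distance coord distance out) := by unfold Spec_get_coords_within_distance; infer_instance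

-- ===== CLAIM (what is proved, stated in full; the proofs are below) =====
def Claim_equal_get_coords_within_distance : Prop := ∀ (coord : Int × Int) (distance : Int), Dom_get_coords_within_distance coord distance → Spec_get_coords_within_distance coord distance (get_coords_within_distance coord distance)

-- ===== LEMMAS AND PROOFS =====

-- skip-`if` loop = fold of add over the filtered list
theorem foldl_skip_if_eq_filter {α β : Type} [BEq β] (p : α → Prop) [DecidablePred p] (f : α → β) :
    ∀ (l : List α) (init : PySem.Set β),
      l.foldl (fun s t => if p t then s else PySem.Set.add s (f t)) init
        = (l.filter (fun t => decide (¬ p t))).foldl (fun s t => PySem.Set.add s (f t)) init := by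
  intro l
  induction l with
  | nil => intro init; rfl
  | cons a l ih =>
    intro init
    by_cases h : p a <;> simp [h, ih]

-- filtering a range by an interval contained in it yields the sub-range
theorem filter_interval (a b lo hi : Int) (h1 : a ≤ lo) (h2 : hi + 1 ≤ b) :
    (PySem.List.pyRange a b 1).filter (fun t => decide (lo ≤ t ∧ t ≤ hi))
      = PySem.List.pyRange lo (hi + 1) 1 := by
  apply List.Perm.eq_of_pairwise' (r := (· ≤ ·))
  · exact List.Pairwise.filter _
      ((PySem.List.pairwise_lt_pyRange_one a b).imp le_of_lt)
  · exact (PySem.List.pairwise_lt_pyRange_one lo (hi + 1)).imp le_of_lt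
  · rw [List.perm_ext_iff_of_nodup
      (List.Nodup.filter _ (PySem.List.nodup_pyRange_one a b))
      (PySem.List.nodup_pyRange_one lo (hi + 1))]
    intro t
    simp only [List.mem_filter, PySem.List.mem_pyRange_one, decide_eq_true_iff]
    omega

-- shifting a range
theorem pyRange_shift (c a b : Int) :
    PySem.List.pyRange (c + a) (c + b) 1
      = (PySem.List.pyRange a b 1).map (fun t => c + t) := by
  rw [PySem.List.pyRange_one, PySem.List.pyRange_one, List.map_map]
  have : (c + b) - (c + a) = b - a := by ring
  rw [this]
  apply List.map_congr_left
  intro k _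
  simp only [Function.comp_apply]
  ring

-- ===== VERDICT (by name: the statement is the Claim_ definition above) =====
theorem get_coords_within_distance_spec : Claim_equal_get_coords_within_distance := by
  intro coord distance _
  unfold Spec_get_coords_within_distance
  unfold get_coords_within_distance get_coords_within_distance_alt
  obtain ⟨x, y⟩ := coord
  simp only
  have houter : PySem.List.pyRange (y - distance) (y + distance + 1) 1
      = (PySem.List.pyRange (-distance) (distance + 1) 1).map (fun t => y + t) := by
    rw [show y - distance = y + (-distance) by ring,
        show y + distance + 1 = y + (distance + 1) by ring]
    exact pyRange_shift y (-distance) (distance + 1)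
  rw [houter, List.foldl_map]
  apply PySem.List.foldl_congr_mem
  intro s dy _
  show (PySem.List.pyRange (x - distance) (x + distance + 1) 1).foldl
      (fun coords x_i =>
        if get_distance (x, y) (x_i, y + dy) > distance then coords
        else PySem.Set.add coords (x_i, y + dy)) s
    = (PySem.List.pyRange (-(distance - |dy|)) ((distance - |dy|) + 1) 1).foldl
      (fun coords dx => PySem.Set.add coords (x + dx, y + dy)) s
  rw [foldl_skip_if_eq_filter (fun x_i => get_distance (x, y) (x_i, y + dy) > distance)
        (fun x_i => (x_i, y + dy))]
  have hfilt : (PySem.List.pyRange (x - distance) (x + distance + 1) 1).filter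
        (fun x_i => decide (¬ get_distance (x, y) (x_i, y + dy) > distance))
      = (PySem.List.pyRange (x - distance) (x + distance + 1) 1).filter
        (fun t => decide ((x - (distance - |dy|)) ≤ t ∧ t ≤ (x + (distance - |dy|)))) := by
    apply List.filter_congr
    intro t _
    rw [decide_eq_decide]
    unfold get_distance
    simp only [not_lt]
    have h1 : |y - (y + dy)| = |dy| := by
      rw [show y - (y + dy) = -dy by ring, abs_neg]
    rw [h1]
    constructor
    · intro h
      have := abs_le.mp (show |x - t| ≤ distance - |dy| by omega)
      omega
    · intro h
      have : |x - t| ≤ distance - |dy| := abs_le.mpr (by omega)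
      omega
  rw [hfilt,
      filter_interval (x - distance) (x + distance + 1)
        (x - (distance - |dy|)) (x + (distance - |dy|))
        (by have := abs_nonneg dy; omega) (by have := abs_nonneg dy; omega),
      show x - (distance - |dy|) = x + (-(distance - |dy|)) by ring,
      show x + (distance - |dy|) + 1 = x + ((distance - |dy|) + 1) by ring,
      pyRange_shift x (-(distance - |dy|)) ((distance - |dy|) + 1),
      List.foldl_map]
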